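-- pv_equiv track=rewrite | github.com/leandrosacchi/CursoPython | exerciciosAula1.py | geraTuplas
-- ===== SOURCE A (Python) =====
-- def geraTuplas(l):
--     par = []
--     impar = []
--
--     if (type(l) == list):
--         for x in l:
--             if (x % 2 == 0):
--                 par.append(x)
--                 par.sort()
--             else:
--                 impar.append(x)
--                 impar.sort()
--         return (par, impar)
--     return "O parâmetro não é uma lista."
-- ===== SOURCE B (Python) =====
-- def geraTuplas(l):
--     if type(l) != list:
--         return "O parâmetro não é uma lista."
--     return (sorted(x for x in l if x % 2 == 0),
--             sorted(x for x in l if x % 2 != 0))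
-- ===== Notes on version B (the rewrite author's own statement) =====
-- stated objective: faster
-- what changed: B filters evens and odds and sorts each list once at the end, instead of A's re-sorting the accumulator after every append.
import Mathlib
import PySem

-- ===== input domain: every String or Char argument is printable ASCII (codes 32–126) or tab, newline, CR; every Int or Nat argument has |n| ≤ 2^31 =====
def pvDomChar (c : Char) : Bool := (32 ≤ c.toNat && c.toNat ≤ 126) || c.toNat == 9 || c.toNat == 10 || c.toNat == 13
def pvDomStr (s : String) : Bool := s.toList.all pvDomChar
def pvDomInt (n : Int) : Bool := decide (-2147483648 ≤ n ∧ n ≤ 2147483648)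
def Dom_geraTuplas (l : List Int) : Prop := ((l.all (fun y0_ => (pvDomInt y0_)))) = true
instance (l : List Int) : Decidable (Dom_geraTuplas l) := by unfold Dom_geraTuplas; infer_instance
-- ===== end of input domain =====

-- B sorts each partition once at the end instead of A's re-sort after every append (faster).

-- ===== PORT A =====
-- A appends each element to par/impar and calls .sort() on that list after every append.
def geraTuplas (l : List Int) : List Int × List Int :=
  l.foldl (fun (st : List Int × List Int) x =>
    if PySem.Int.mod x 2 = 0 then
      (PySem.List.sorted (st.1 ++ [x]) (fun y => y) false, st.2)
    else
      (st.1, PySem.List.sorted (st.2 ++ [x]) (fun y => y) false)) ([], [])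

-- ===== PORT B =====
-- B filters evens and odds, sorting each filtered list once.
def geraTuplas_alt (l : List Int) : List Int × List Int :=
  (PySem.List.sorted (l.filter (fun x => decide (PySem.Int.mod x 2 = 0))) (fun y => y) false,
   PySem.List.sorted (l.filter (fun x => decide (¬ PySem.Int.mod x 2 = 0))) (fun y => y) false)

-- ===== PRECONDITION & SPEC =====
def Spec_geraTuplas (l : List Int) (out : List Int × List Int) : Prop := out = geraTuplas_alt l
instance (l : List Int) (out : List Int × List Int) : Decidable (Spec_geraTuplas l out) := by unfold Spec_geraTuplas; infer_instance

-- ===== CLAIM (what is proved, stated in full; the proofs are below) =====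
def Claim_equal_geraTuplas : Prop := ∀ (l : List Int), Dom_geraTuplas l → Spec_geraTuplas l (geraTuplas l)

-- ===== LEMMAS AND PROOFS =====

-- sorting a sorted list with one element appended = sorting the whole list (permutation, injective key)
theorem pv_sorted_app (xs : List Int) (y : Int) :
    PySem.List.sorted (PySem.List.sorted xs (fun z => z) false ++ [y]) (fun z => z) false
      = PySem.List.sorted (xs ++ [y]) (fun z => z) false := by
  apply PySem.List.sorted_eq_sorted_of_perm
  · intro a b h; exact h
  · exact List.Perm.append_right [y] (PySem.List.sorted_perm xs (fun z => z) false)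

theorem pv_fold_inv (l : List Int) (a b : List Int) :
    l.foldl (fun (st : List Int × List Int) x =>
      if PySem.Int.mod x 2 = 0 then
        (PySem.List.sorted (st.1 ++ [x]) (fun y => y) false, st.2)
      else
        (st.1, PySem.List.sorted (st.2 ++ [x]) (fun y => y) false))
      (PySem.List.sorted a (fun y => y) false, PySem.List.sorted b (fun y => y) false)
    = (PySem.List.sorted (a ++ l.filter (fun x => decide (PySem.Int.mod x 2 = 0))) (fun y => y) false,
       PySem.List.sorted (b ++ l.filter (fun x => decide (¬ PySem.Int.mod x 2 = 0))) (fun y => y) false) := by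
  induction l generalizing a b with
  | nil => simp
  | cons x t ih =>
    by_cases h : PySem.Int.mod x 2 = 0
    · have hd : (2:Int) ∣ x := by simp [PySem.Int.mod, Int.fmod_eq_emod_of_nonneg x (by norm_num : (0:Int) ≤ 2)] at h; omega
      have hm : ¬ (x % 2 = 1) := by omega
      simp only [List.foldl_cons, if_pos h, pv_sorted_app]
      rw [ih (a ++ [x]) b]
      simp [hd, hm]
    · have hd : ¬ (2:Int) ∣ x := by simp [PySem.Int.mod, Int.fmod_eq_emod_of_nonneg x (by norm_num : (0:Int) ≤ 2)] at h; omega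
      have hm : x % 2 = 1 := by omega
      simp only [List.foldl_cons, if_neg h, pv_sorted_app]
      rw [ih a (b ++ [x])]
      simp [hd, hm]

-- ===== VERDICT (by name: the statement is the Claim_ definition above) =====
theorem geraTuplas_spec : Claim_equal_geraTuplas := by
  intro l _
  show geraTuplas l = geraTuplas_alt l
  unfold geraTuplas geraTuplas_alt
  have h := pv_fold_inv l [] []
  simpa using h
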